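-- pv_equiv track=rewrite | github.com/OmmarShaikh01/Apollo | apollo_beets.py | tree_creator
-- ===== SOURCE A (Python) =====
-- def tree_creator(data):
--     main_tree = {}
--     level = 0
--     while level != 4:
--         for i in data:
--             if level == 0:
--                 main_tree[i[:level + 1][0]] = None
--
--             if level == 1:
--                 a, b = i[:level + 1]
--                 if main_tree[a] == None:
--                     main_tree[a] = {b: None}
--                 else:
--                     main_tree[a][b] = None
--
--             if level == 2:
--                 a, b, c = i[:level + 1]
--                 if main_tree[a][b] == None:
--                     main_tree[a][b] = {c: None}
--                 else:
--                     main_tree[a][b][c] = None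
--
--             if level == 3:
--                 a, b, c, d = i[:level + 1]
--                 if main_tree[a][b][c] == None:
--                     main_tree[a][b][c] = [d]
--                 else:
--                     (main_tree[a][b][c]).extend([d])
--         level += 1
--     return main_tree
-- ===== SOURCE B (Python) =====
-- def tree_creator(data):
--     tree = {}
--     for i in data:
--         a, b, c, d = i[:4]
--         lvl1 = tree.setdefault(a, {})
--         lvl2 = lvl1.setdefault(b, {})
--         lvl3 = lvl2.setdefault(c, [])
--         lvl3.append(d)
--     return tree
-- ===== Notes on version B (the rewrite author's own statement) =====
-- stated objective: simpler
-- what changed: Replaces A's four whole-list level-passes with None sentinels and repeated nested re-lookups by a single pass that descends once per item with setdefault, producing the identical nested dict-of-dict-of-dict-of-list.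
import Mathlib
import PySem

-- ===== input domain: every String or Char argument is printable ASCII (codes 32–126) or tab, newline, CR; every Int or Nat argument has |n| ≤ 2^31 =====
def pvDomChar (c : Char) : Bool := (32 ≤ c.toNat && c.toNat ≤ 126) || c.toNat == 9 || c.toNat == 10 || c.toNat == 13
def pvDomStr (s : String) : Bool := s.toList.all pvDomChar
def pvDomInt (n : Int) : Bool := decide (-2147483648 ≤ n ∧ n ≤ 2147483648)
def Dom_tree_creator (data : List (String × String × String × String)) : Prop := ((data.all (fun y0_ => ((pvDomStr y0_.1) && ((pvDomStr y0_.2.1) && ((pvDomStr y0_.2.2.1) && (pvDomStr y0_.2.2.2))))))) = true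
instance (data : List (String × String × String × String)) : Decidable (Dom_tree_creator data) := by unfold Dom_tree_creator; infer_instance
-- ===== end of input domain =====

-- B replaces A's four whole-list level-passes (None sentinels, repeated nested re-lookups) by one
-- setdefault-descent pass per item: simpler, same return value.

-- ===== PORT A =====
-- A's nested dict with its None sentinels: a value is `none` until the next level-pass fills it.
abbrev DC := PySem.Dict String (Option (List String))
abbrev DB := PySem.Dict String (Option DC)
abbrev DA := PySem.Dict String (Option DB)

-- the `while level != 4` loop, unrolled into its four level passes (level is 0,1,2,3, one pass each)

-- level == 0: main_tree[i[:1][0]] = None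
def treeApass0 (data : List (String × String × String × String)) (d : DA) : DA :=
  data.foldl (fun d i => d.insert i.1 none) d

-- level == 1: a, b = i[:2]; if main_tree[a] == None: main_tree[a] = {b: None} else: main_tree[a][b] = None
def treeApass1 (data : List (String × String × String × String)) (d : DA) : DA :=
  data.foldl (fun d i =>
    match d.getD i.1 none with
    | none => d.insert i.1 (some (PySem.Dict.empty.insert i.2.1 none))
    | some m => d.insert i.1 (some (m.insert i.2.1 none))) d

-- level == 2: a, b, c = i[:3]; branch on main_tree[a][b] == None.
-- main_tree[a]: the key was inserted by the level-0 pass, so Python's KeyError is unreachable;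
-- it is ported as `(d.getD i.1 none).getD Dict.empty`.
def treeApass2 (data : List (String × String × String × String)) (d : DA) : DA :=
  data.foldl (fun d i =>
    let m1 : DB := (d.getD i.1 none).getD PySem.Dict.empty
    match m1.getD i.2.1 none with
    | none => d.insert i.1 (some (m1.insert i.2.1 (some (PySem.Dict.empty.insert i.2.2.1 none))))
    | some m2 => d.insert i.1 (some (m1.insert i.2.1 (some (m2.insert i.2.2.1 none))))) d

-- level == 3: a, b, c, d = i[:4]; if main_tree[a][b][c] == None: … = [d] else: ….extend([d])
-- (main_tree[a] and main_tree[a][b] exist after the level-0/1 passes, same unreachable-KeyError note)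
def treeApass3 (data : List (String × String × String × String)) (d : DA) : DA :=
  data.foldl (fun d i =>
    let m1 : DB := (d.getD i.1 none).getD PySem.Dict.empty
    let m2 : DC := (m1.getD i.2.1 none).getD PySem.Dict.empty
    match m2.getD i.2.2.1 none with
    | none => d.insert i.1 (some (m1.insert i.2.1 (some (m2.insert i.2.2.1 (some [i.2.2.2])))))
    | some l => d.insert i.1 (some (m1.insert i.2.1 (some (m2.insert i.2.2.1 (some (l ++ [i.2.2.2]))))))) d

-- return main_tree; the trailing .items maps are the dict → association-list boundary of the type
-- convention (after all four passes every sentinel is filled, the getD defaults never fire).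
def tree_creator (data : List (String × String × String × String)) : List (String × List (String × List (String × List String))) :=
  (treeApass3 data (treeApass2 data (treeApass1 data (treeApass0 data PySem.Dict.empty)))).items.map (fun p => (p.1, (p.2.getD PySem.Dict.empty).items.map (fun q =>
    (q.1, (q.2.getD PySem.Dict.empty).items.map (fun r => (r.1, r.2.getD []))))))

-- ===== PORT B =====
-- one pass; tree.setdefault(k, dflt) followed by the in-place update of the returned reference is
-- exactly Dict.modify k dflt (update), applied at the three levels (leaf: lvl3.append(d)).
def tree_creator_alt (data : List (String × String × String × String)) : List (String × List (String × List (String × List String))) :=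
  (data.foldl (fun t i =>
      t.modify i.1 PySem.Dict.empty (fun l1 =>
        l1.modify i.2.1 PySem.Dict.empty (fun l2 =>
          l2.modify i.2.2.1 [] (fun l3 => l3 ++ [i.2.2.2])))) PySem.Dict.empty).items.map
    (fun p => (p.1, p.2.items.map (fun q => (q.1, q.2.items))))

-- ===== PRECONDITION & SPEC =====
def Spec_tree_creator (data : List (String × String × String × String)) (out : List (String × List (String × List (String × List String)))) : Prop := out = tree_creator_alt data
instance (data : List (String × String × String × String)) (out : List (String × List (String × List (String × List String)))) : Decidable (Spec_tree_creator data out) := by unfold Spec_tree_creator; infer_instance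

-- ===== CLAIM (what is proved, stated in full; the proofs are below) =====
def Claim_equal_tree_creator : Prop := ∀ (data : List (String × String × String × String)), Dom_tree_creator data → Spec_tree_creator data (tree_creator data)

-- ===== LEMMAS AND PROOFS =====

-- The common shape of every loop in both ports: a fold of per-item Dict.modify updates keyed by
-- `key i`.  It groups: existing entries are updated in place by the items with their key, new keys
-- are appended in first-occurrence order.

lemma modifyFold_items {I V : Type} (key : I → String) (dflt : V) (f : I → V → V) :
    ∀ (js : List I) (d : PySem.Dict String V), d.keys.Nodup →
    (js.foldl (fun d i => d.modify (key i) dflt (f i)) d).items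
      = d.items.map (fun p => (p.1, (js.filter (fun i => key i == p.1)).foldl (fun v i => f i v) p.2))
        ++ ((PySem.Set.ofList (js.map key)).filter (fun k => !(d.contains k))).map
            (fun k => (k, (js.filter (fun i => key i == k)).foldl (fun v i => f i v) dflt))
  | [], d, hnd => by simp
  | i :: js, d, hnd => by
      rw [List.foldl_cons]
      have hnd' : (d.modify (key i) dflt (f i)).keys.Nodup := by
        simp only [PySem.Dict.modify]; exact PySem.Dict.nodup_keys_insert _ _ _ hnd
      rw [modifyFold_items key dflt f js _ hnd']
      rw [List.map_cons, PySem.Set.ofList_cons]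
      by_cases hc : d.contains (key i) = true
      · have hitems : (d.modify (key i) dflt (f i)).items
            = d.items.map (fun p => if (p.1 == key i) = true then (key i, f i (d.getD (key i) dflt)) else p) := by
          simp only [PySem.Dict.modify]
          exact PySem.Dict.items_insert_of_contains _ _ hc
        have hcont : ∀ k, (d.modify (key i) dflt (f i)).contains k = d.contains k := by
          intro k
          simp only [PySem.Dict.modify, PySem.Dict.contains_insert]
          by_cases hk : (k == key i) = true
          · simp [(by exact eq_of_beq hk : k = key i), hc]
          · simp [hk]
        rw [hitems, List.map_map]
        simp only [hcont]
        congr 1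
        · apply List.map_congr_left
          intro p hp
          by_cases hk : (p.1 == key i) = true
          · have hpk : p.1 = key i := eq_of_beq hk
            have hv : d.getD (key i) dflt = p.2 := by
              have : (key i, p.2) ∈ d.items := by rw [← hpk]; exact hp
              exact PySem.Dict.getD_of_mem_items d this hnd dflt
            simp only [Function.comp, hk, List.filter_cons]
            simp [hpk, hv]
          · have hne : ¬ key i = p.1 := fun h => hk (by simp [h])
            simp only [Function.comp, hk, List.filter_cons]
            simp [hne]
        · rw [List.filter_cons, if_neg (by simp [hc])]
          have hdis : ((PySem.Set.ofList (js.map key)).discard (key i)).filter (fun k => !(d.contains k))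
              = (PySem.Set.ofList (js.map key)).filter (fun k => !(d.contains k)) := by
            simp only [PySem.Set.discard, List.filter_filter]
            apply List.filter_congr
            intro k _
            by_cases hkk : k = key i
            · simp [hkk, hc]
            · simp [hkk]
          rw [hdis]
          apply List.map_congr_left
          intro k hk
          have hkne : (key i == k) = false := by
            have hkc : (!(d.contains k)) = true := (List.mem_filter.mp hk).2
            by_cases hkk : key i = k
            · rw [hkk] at hc; simp [hc] at hkc
            · simp [hkk]
          simp [hkne]
      · have hcf : d.contains (key i) = false := by simpa using hc
        have hitems : (d.modify (key i) dflt (f i)).items = d.items ++ [(key i, f i dflt)] := by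
          simp only [PySem.Dict.modify, PySem.Dict.getD_of_not_contains d dflt hcf]
          exact PySem.Dict.items_insert_of_not_contains _ _ hcf
        have hcont : ∀ k, (d.modify (key i) dflt (f i)).contains k = ((k == key i) || d.contains k) := by
          intro k; simp only [PySem.Dict.modify, PySem.Dict.contains_insert]
        rw [hitems, List.map_append]
        simp only [hcont]
        have hkeyi_notin : key i ∉ d.keys := fun hmem => by
          rw [(PySem.Dict.contains_iff_mem_keys d (key i)).mpr hmem] at hcf; cases hcf
        have hsplit : List.filter (fun k => !d.contains k) (key i :: (PySem.Set.ofList (js.map key)).discard (key i))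
            = key i :: ((PySem.Set.ofList (js.map key)).discard (key i)).filter (fun k => !d.contains k) := by
          rw [List.filter_cons, if_pos (by simp [hcf])]
        rw [hsplit, List.map_cons, List.append_assoc]
        congr 1
        · apply List.map_congr_left
          intro p hp
          have hpk : p.1 ∈ d.keys := List.mem_map_of_mem hp
          have hne : (key i == p.1) = false := by
            by_cases h : key i = p.1
            · exact absurd (h ▸ hpk) hkeyi_notin
            · simp [h]
          have hne' : ¬ key i = p.1 := by intro h; rw [h] at hne; simp at hne
          simp [hne']
        simp only [List.map_nil, List.singleton_append]
        congr 1
        · simp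
        · have hpred : ((PySem.Set.ofList (js.map key)).discard (key i)).filter (fun k => !d.contains k)
              = (PySem.Set.ofList (js.map key)).filter (fun k => !k == key i && !d.contains k) := by
            simp only [PySem.Set.discard, List.filter_filter]
            exact List.filter_congr (fun k _ => by
              cases h1 : (k == key i) <;> cases h2 : d.contains k <;> simp)
          rw [hpred]
          rw [show (fun k => (!(k == key i || d.contains k))) = (fun k => !k == key i && !d.contains k) from
            funext (fun k => by cases h1 : (k == key i) <;> cases h2 : d.contains k <;> simp)]
          apply List.map_congr_left
          intro k hk
          have hkb := (List.mem_filter.mp hk).2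
          have hkne : ¬ key i = k := by
            intro h
            rw [← h] at hkb
            simp at hkb
          simp [hkne]

-- starting from the empty dict the in-place segment vanishes
lemma modifyFold_items_empty {I V : Type} (key : I → String) (dflt : V) (f : I → V → V) (js : List I) :
    (js.foldl (fun d i => d.modify (key i) dflt (f i)) PySem.Dict.empty).items
      = (PySem.Set.ofList (js.map key)).map
          (fun k => (k, (js.filter (fun i => key i == k)).foldl (fun v i => f i v) dflt)) := by
  rw [modifyFold_items key dflt f js PySem.Dict.empty (by simp [PySem.Dict.empty, PySem.Dict.keys])]
  simp [PySem.Dict.empty]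

-- a pass over a dict whose keys already cover every item's key updates entries in place
lemma modifyFold_items_on {I V : Type} (key : I → String) (dflt : V) (f : I → V → V) (js : List I)
    (d : PySem.Dict String V) (ks : List String) (vfun : String → V)
    (hnd : ks.Nodup) (hitems : d.items = ks.map (fun k => (k, vfun k)))
    (hmem : ∀ i ∈ js, key i ∈ ks) :
    (js.foldl (fun d i => d.modify (key i) dflt (f i)) d).items
      = ks.map (fun k => (k, (js.filter (fun i => key i == k)).foldl (fun v i => f i v) (vfun k))) := by
  have hkeys : d.keys = ks := by
    rw [PySem.Dict.keys, hitems, List.map_map]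
    exact List.map_id'' (fun k => rfl) ks
  have hndk : d.keys.Nodup := by rw [hkeys]; exact hnd
  rw [modifyFold_items key dflt f js d hndk, hitems, List.map_map]
  have hfilters : (PySem.Set.ofList (js.map key)).filter (fun k => !(d.contains k)) = [] := by
    rw [List.filter_eq_nil_iff]
    intro k hk
    have hkks : k ∈ ks := by
      have hkm : k ∈ js.map key := (PySem.Set.mem_ofList _ _).mp hk
      obtain ⟨i, hi, hki⟩ := List.mem_map.mp hkm
      exact hki ▸ hmem i hi
    have : d.contains k = true := (PySem.Dict.contains_iff_mem_keys d k).mpr (hkeys ▸ hkks)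
    simp [this]
  rw [hfilters]
  simp only [List.map_nil, List.append_nil]
  apply List.map_congr_left
  intro k _
  simp

-- Option-sentinel folds: once the value is `some`, the wrapper peels off …
lemma foldl_someWrap {I W : Type} (g : I → W → W) (dflt : W) :
    ∀ (js : List I) (m : W),
      js.foldl (fun o i => some (g i (o.getD dflt))) (some m) = some (js.foldl (fun m i => g i m) m)
  | [], m => rfl
  | i :: js, m => by
      rw [List.foldl_cons, List.foldl_cons]
      exact foldl_someWrap g dflt js (g i m)

-- … and a nonempty fold from the sentinel `none` lands on the default
lemma foldl_someWrap_none {I W : Type} (g : I → W → W) (dflt : W) (js : List I) (h : js ≠ []) :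
    js.foldl (fun o i => some (g i (o.getD dflt))) none = some (js.foldl (fun m i => g i m) dflt) := by
  cases js with
  | nil => exact absurd rfl h
  | cons i js =>
      rw [List.foldl_cons, List.foldl_cons]
      simpa using foldl_someWrap g dflt js (g i dflt)

lemma foldl_constNone {I W : Type} (js : List I) (h : js ≠ []) (v : Option W) :
    js.foldl (fun _ _ => (none : Option W)) v = none := by
  cases js with
  | nil => exact absurd rfl h
  | cons i js =>
      rw [List.foldl_cons]
      clear h
      induction js generalizing v with
      | nil => rfl
      | cons j js ih => rw [List.foldl_cons]; exact ih v

-- each key of the grouping set has at least one item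
lemma filter_key_ne_nil {I : Type} (key : I → String) (js : List I) (k : String)
    (hk : k ∈ PySem.Set.ofList (js.map key)) : js.filter (fun i => key i == k) ≠ [] := by
  have hkm : k ∈ js.map key := (PySem.Set.mem_ofList _ _).mp hk
  obtain ⟨i, hi, hki⟩ := List.mem_map.mp hkm
  intro h
  have : i ∈ js.filter (fun i => key i == k) := List.mem_filter.mpr ⟨hi, by simp [hki]⟩
  simp [h] at this

-- the per-level update functions A's passes perform on the inner dicts
def gB1 (i : String × String × String × String) (m : DB) : DB := m.insert i.2.1 none
def gC1 (i : String × String × String × String) (m : DC) : DC := m.insert i.2.2.1 none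
def gC2 (i : String × String × String × String) (m : DC) : DC :=
  m.modify i.2.2.1 none (fun o => some ((o.getD []) ++ [i.2.2.2]))
def gB2 (i : String × String × String × String) (m : DB) : DB :=
  m.modify i.2.1 none (fun o => some (gC1 i (o.getD PySem.Dict.empty)))
def gB3 (i : String × String × String × String) (m : DB) : DB :=
  m.modify i.2.1 none (fun o => some (gC2 i (o.getD PySem.Dict.empty)))

-- the common grouped normal form both programs compute
def canonC (js : List (String × String × String × String)) : List (String × List String) :=
  (PySem.Set.ofList (js.map (fun i => i.2.2.1))).map
    (fun c => (c, (js.filter (fun i => i.2.2.1 == c)).map (fun i => i.2.2.2)))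
def canonB (js : List (String × String × String × String)) : List (String × List (String × List String)) :=
  (PySem.Set.ofList (js.map (fun i => i.2.1))).map
    (fun b => (b, canonC (js.filter (fun i => i.2.1 == b))))
def canonA (data : List (String × String × String × String)) : List (String × List (String × List (String × List String))) :=
  (PySem.Set.ofList (data.map (fun i => i.1))).map
    (fun a => (a, canonB (data.filter (fun i => i.1 == a))))

-- each of A's passes is a fold of Dict.modify updates (the None-branches collapse into getD)
lemma passA0_modify (data : List (String × String × String × String)) (d : DA) :
    treeApass0 data d = data.foldl (fun d i => d.modify i.1 none (fun _ => none)) d := rfl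

lemma passA1_modify (data : List (String × String × String × String)) (d : DA) :
    treeApass1 data d
      = data.foldl (fun d i => d.modify i.1 none (fun o => some (gB1 i (o.getD PySem.Dict.empty)))) d := by
  unfold treeApass1
  congr 1
  funext d i
  cases h : d.getD i.1 none with
  | none => simp [PySem.Dict.modify, h, gB1]
  | some m => simp [PySem.Dict.modify, h, gB1]

lemma passA2_modify (data : List (String × String × String × String)) (d : DA) :
    treeApass2 data d
      = data.foldl (fun d i => d.modify i.1 none (fun o => some (gB2 i (o.getD PySem.Dict.empty)))) d := by
  unfold treeApass2
  congr 1
  funext d i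
  cases h : ((d.getD i.1 none).getD PySem.Dict.empty).getD i.2.1 none with
  | none => simp [PySem.Dict.modify, h, gB2, gC1]
  | some m => simp [PySem.Dict.modify, h, gB2, gC1]

lemma passA3_modify (data : List (String × String × String × String)) (d : DA) :
    treeApass3 data d
      = data.foldl (fun d i => d.modify i.1 none (fun o => some (gB3 i (o.getD PySem.Dict.empty)))) d := by
  unfold treeApass3
  congr 1
  funext d i
  cases h : (((d.getD i.1 none).getD PySem.Dict.empty).getD i.2.1 none |>.getD PySem.Dict.empty).getD i.2.2.1 none with
  | none => simp [PySem.Dict.modify, h, gB3, gC2]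
  | some l => simp [PySem.Dict.modify, h, gB3, gC2]

-- the inner dicts A accumulates per first-level/second-level key
def WC (js : List (String × String × String × String)) : DC :=
  js.foldl (fun m i => gC2 i m) (js.foldl (fun m i => gC1 i m) PySem.Dict.empty)
def WB (js : List (String × String × String × String)) : DB :=
  js.foldl (fun m i => gB3 i m) (js.foldl (fun m i => gB2 i m) (js.foldl (fun m i => gB1 i m) PySem.Dict.empty))

lemma WC_items (js : List (String × String × String × String)) :
    (WC js).items = (PySem.Set.ofList (js.map (fun i => i.2.2.1))).map
      (fun c => (c, some ((js.filter (fun i => i.2.2.1 == c)).map (fun i => i.2.2.2)))) := by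
  unfold WC
  have h1 : (js.foldl (fun (m : DC) i => gC1 i m) PySem.Dict.empty).items
      = (PySem.Set.ofList (js.map (fun i => i.2.2.1))).map
          (fun c => (c, (none : Option (List String)))) := by
    have h0 : (js.foldl (fun (m : DC) i => gC1 i m) PySem.Dict.empty).items
        = (PySem.Set.ofList (js.map (fun i => i.2.2.1))).map
            (fun c => (c, (js.filter (fun i => i.2.2.1 == c)).foldl
              (fun (v : Option (List String)) _ => none) none)) :=
      modifyFold_items_empty (fun i => i.2.2.1) none (fun _ _ => none) js
    rw [h0]
    apply List.map_congr_left
    intro c hc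
    rw [foldl_constNone _ (filter_key_ne_nil _ js c hc)]
  have h2 : (js.foldl (fun (m : DC) i => gC2 i m) (js.foldl (fun (m : DC) i => gC1 i m) PySem.Dict.empty)).items
      = (PySem.Set.ofList (js.map (fun i => i.2.2.1))).map
          (fun c => (c, (js.filter (fun i => i.2.2.1 == c)).foldl
            (fun (o : Option (List String)) i => some ((o.getD []) ++ [i.2.2.2])) none)) :=
    modifyFold_items_on (fun (i : String × String × String × String) => i.2.2.1) none
      (fun (i : String × String × String × String) o => some ((o.getD []) ++ [i.2.2.2])) js
      _ _ (fun _ => none) (PySem.Set.nodup_ofList _) h1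
      (fun i hi => (PySem.Set.mem_ofList _ _).mpr (List.mem_map_of_mem hi))
  rw [h2]
  apply List.map_congr_left
  intro c hc
  have h3 : (js.filter (fun i => i.2.2.1 == c)).foldl
        (fun (o : Option (List String)) i => some ((o.getD []) ++ [i.2.2.2])) none
      = some ((js.filter (fun i => i.2.2.1 == c)).foldl (fun l i => l ++ [i.2.2.2]) []) :=
    foldl_someWrap_none (fun (i : String × String × String × String) l => l ++ [i.2.2.2]) [] _ (filter_key_ne_nil _ js c hc)
  rw [h3]
  have h4 : (js.filter (fun i => i.2.2.1 == c)).foldl (fun l i => l ++ [i.2.2.2]) ([] : List String)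
      = [] ++ (js.filter (fun i => i.2.2.1 == c)).map (fun i => i.2.2.2) :=
    PySem.List.foldl_append_singleton_eq_map _ _ _
  rw [h4]
  simp

lemma WB_items (js : List (String × String × String × String)) :
    (WB js).items = (PySem.Set.ofList (js.map (fun i => i.2.1))).map
      (fun b => (b, some (WC (js.filter (fun i => i.2.1 == b))))) := by
  unfold WB
  have h1 : (js.foldl (fun (m : DB) i => gB1 i m) PySem.Dict.empty).items
      = (PySem.Set.ofList (js.map (fun i => i.2.1))).map (fun b => (b, (none : Option DC))) := by
    have h0 : (js.foldl (fun (m : DB) i => gB1 i m) PySem.Dict.empty).items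
        = (PySem.Set.ofList (js.map (fun i => i.2.1))).map
            (fun b => (b, (js.filter (fun i => i.2.1 == b)).foldl (fun (v : Option DC) _ => none) none)) :=
      modifyFold_items_empty (fun (i : String × String × String × String) => i.2.1) none (fun _ _ => none) js
    rw [h0]
    apply List.map_congr_left
    intro b hb
    rw [foldl_constNone _ (filter_key_ne_nil _ js b hb)]
  have h2 : (js.foldl (fun (m : DB) i => gB2 i m) (js.foldl (fun (m : DB) i => gB1 i m) PySem.Dict.empty)).items
      = (PySem.Set.ofList (js.map (fun i => i.2.1))).map
          (fun b => (b, (js.filter (fun i => i.2.1 == b)).foldl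
            (fun (o : Option DC) i => some (gC1 i (o.getD PySem.Dict.empty))) none)) :=
    modifyFold_items_on (fun (i : String × String × String × String) => i.2.1) none
      (fun (i : String × String × String × String) o => some (gC1 i (o.getD PySem.Dict.empty))) js
      _ _ (fun _ => none) (PySem.Set.nodup_ofList _) h1
      (fun i hi => (PySem.Set.mem_ofList _ _).mpr (List.mem_map_of_mem hi))
  have h2' : (js.foldl (fun (m : DB) i => gB2 i m) (js.foldl (fun (m : DB) i => gB1 i m) PySem.Dict.empty)).items
      = (PySem.Set.ofList (js.map (fun i => i.2.1))).map
          (fun b => (b, some ((js.filter (fun i => i.2.1 == b)).foldl (fun (m : DC) i => gC1 i m) PySem.Dict.empty))) := by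
    rw [h2]
    apply List.map_congr_left
    intro b hb
    have := foldl_someWrap_none (fun (i : String × String × String × String) (m : DC) => gC1 i m)
      PySem.Dict.empty (js.filter (fun i => i.2.1 == b)) (filter_key_ne_nil _ js b hb)
    rw [this]
  have h3 : (js.foldl (fun (m : DB) i => gB3 i m)
        (js.foldl (fun (m : DB) i => gB2 i m) (js.foldl (fun (m : DB) i => gB1 i m) PySem.Dict.empty))).items
      = (PySem.Set.ofList (js.map (fun i => i.2.1))).map
          (fun b => (b, (js.filter (fun i => i.2.1 == b)).foldl
            (fun (o : Option DC) i => some (gC2 i (o.getD PySem.Dict.empty)))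
            (some ((js.filter (fun i => i.2.1 == b)).foldl (fun (m : DC) i => gC1 i m) PySem.Dict.empty)))) :=
    modifyFold_items_on (fun (i : String × String × String × String) => i.2.1) none
      (fun (i : String × String × String × String) o => some (gC2 i (o.getD PySem.Dict.empty))) js
      _ (PySem.Set.ofList (js.map (fun (i : String × String × String × String) => i.2.1)))
      (fun (b : String) => some ((js.filter (fun (i : String × String × String × String) => i.2.1 == b)).foldl
        (fun (m : DC) i => gC1 i m) PySem.Dict.empty))
      (PySem.Set.nodup_ofList _) h2'
      (fun i hi => (PySem.Set.mem_ofList _ _).mpr (List.mem_map_of_mem hi))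
  rw [h3]
  apply List.map_congr_left
  intro b _
  rw [foldl_someWrap (fun (i : String × String × String × String) (m : DC) => gC2 i m) PySem.Dict.empty]
  rfl

lemma treeA_items (data : List (String × String × String × String)) :
    (treeApass3 data (treeApass2 data (treeApass1 data (treeApass0 data PySem.Dict.empty)))).items
      = (PySem.Set.ofList (data.map (fun i => i.1))).map
          (fun a => (a, some (WB (data.filter (fun i => i.1 == a))))) := by
  rw [passA0_modify, passA1_modify, passA2_modify, passA3_modify]
  have h0 : (data.foldl (fun (d : DA) i => d.modify i.1 none (fun _ => none)) PySem.Dict.empty).items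
      = (PySem.Set.ofList (data.map (fun i => i.1))).map (fun a => (a, (none : Option DB))) := by
    have h00 : (data.foldl (fun (d : DA) i => d.modify i.1 none (fun _ => none)) PySem.Dict.empty).items
        = (PySem.Set.ofList (data.map (fun i => i.1))).map
            (fun a => (a, (data.filter (fun i => i.1 == a)).foldl (fun (v : Option DB) _ => none) none)) :=
      modifyFold_items_empty (fun (i : String × String × String × String) => i.1) none (fun _ _ => none) data
    rw [h00]
    apply List.map_congr_left
    intro a ha
    rw [foldl_constNone _ (filter_key_ne_nil _ data a ha)]
  have h1 : (data.foldl (fun (d : DA) i => d.modify i.1 none (fun o => some (gB1 i (o.getD PySem.Dict.empty))))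
        (data.foldl (fun (d : DA) i => d.modify i.1 none (fun _ => none)) PySem.Dict.empty)).items
      = (PySem.Set.ofList (data.map (fun i => i.1))).map
          (fun a => (a, (data.filter (fun i => i.1 == a)).foldl
            (fun (o : Option DB) i => some (gB1 i (o.getD PySem.Dict.empty))) none)) :=
    modifyFold_items_on (fun (i : String × String × String × String) => i.1) none
      (fun (i : String × String × String × String) o => some (gB1 i (o.getD PySem.Dict.empty))) data
      _ _ (fun _ => none) (PySem.Set.nodup_ofList _) h0
      (fun i hi => (PySem.Set.mem_ofList _ _).mpr (List.mem_map_of_mem hi))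
  have h1' : (data.foldl (fun (d : DA) i => d.modify i.1 none (fun o => some (gB1 i (o.getD PySem.Dict.empty))))
        (data.foldl (fun (d : DA) i => d.modify i.1 none (fun _ => none)) PySem.Dict.empty)).items
      = (PySem.Set.ofList (data.map (fun i => i.1))).map
          (fun a => (a, some ((data.filter (fun i => i.1 == a)).foldl (fun (m : DB) i => gB1 i m) PySem.Dict.empty))) := by
    rw [h1]
    apply List.map_congr_left
    intro a ha
    rw [foldl_someWrap_none (fun (i : String × String × String × String) (m : DB) => gB1 i m)
      PySem.Dict.empty _ (filter_key_ne_nil _ data a ha)]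
  have h2 : (data.foldl (fun (d : DA) i => d.modify i.1 none (fun o => some (gB2 i (o.getD PySem.Dict.empty))))
        (data.foldl (fun (d : DA) i => d.modify i.1 none (fun o => some (gB1 i (o.getD PySem.Dict.empty))))
          (data.foldl (fun (d : DA) i => d.modify i.1 none (fun _ => none)) PySem.Dict.empty))).items
      = (PySem.Set.ofList (data.map (fun i => i.1))).map
          (fun a => (a, (data.filter (fun i => i.1 == a)).foldl
            (fun (o : Option DB) i => some (gB2 i (o.getD PySem.Dict.empty)))
            (some ((data.filter (fun i => i.1 == a)).foldl (fun (m : DB) i => gB1 i m) PySem.Dict.empty)))) :=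
    modifyFold_items_on (fun (i : String × String × String × String) => i.1) none
      (fun (i : String × String × String × String) o => some (gB2 i (o.getD PySem.Dict.empty))) data
      _ (PySem.Set.ofList (data.map (fun (i : String × String × String × String) => i.1)))
      (fun (a : String) => some ((data.filter (fun (i : String × String × String × String) => i.1 == a)).foldl
        (fun (m : DB) i => gB1 i m) PySem.Dict.empty))
      (PySem.Set.nodup_ofList _) h1'
      (fun i hi => (PySem.Set.mem_ofList _ _).mpr (List.mem_map_of_mem hi))
  have h2' : (data.foldl (fun (d : DA) i => d.modify i.1 none (fun o => some (gB2 i (o.getD PySem.Dict.empty))))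
        (data.foldl (fun (d : DA) i => d.modify i.1 none (fun o => some (gB1 i (o.getD PySem.Dict.empty))))
          (data.foldl (fun (d : DA) i => d.modify i.1 none (fun _ => none)) PySem.Dict.empty))).items
      = (PySem.Set.ofList (data.map (fun i => i.1))).map
          (fun a => (a, some ((data.filter (fun i => i.1 == a)).foldl (fun (m : DB) i => gB2 i m)
            ((data.filter (fun i => i.1 == a)).foldl (fun (m : DB) i => gB1 i m) PySem.Dict.empty)))) := by
    rw [h2]
    apply List.map_congr_left
    intro a _
    rw [foldl_someWrap (fun (i : String × String × String × String) (m : DB) => gB2 i m) PySem.Dict.empty]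
  have h3 : (data.foldl (fun (d : DA) i => d.modify i.1 none (fun o => some (gB3 i (o.getD PySem.Dict.empty))))
        (data.foldl (fun (d : DA) i => d.modify i.1 none (fun o => some (gB2 i (o.getD PySem.Dict.empty))))
          (data.foldl (fun (d : DA) i => d.modify i.1 none (fun o => some (gB1 i (o.getD PySem.Dict.empty))))
            (data.foldl (fun (d : DA) i => d.modify i.1 none (fun _ => none)) PySem.Dict.empty)))).items
      = (PySem.Set.ofList (data.map (fun i => i.1))).map
          (fun a => (a, (data.filter (fun i => i.1 == a)).foldl
            (fun (o : Option DB) i => some (gB3 i (o.getD PySem.Dict.empty)))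
            (some ((data.filter (fun i => i.1 == a)).foldl (fun (m : DB) i => gB2 i m)
              ((data.filter (fun i => i.1 == a)).foldl (fun (m : DB) i => gB1 i m) PySem.Dict.empty))))) :=
    modifyFold_items_on (fun (i : String × String × String × String) => i.1) none
      (fun (i : String × String × String × String) o => some (gB3 i (o.getD PySem.Dict.empty))) data
      _ (PySem.Set.ofList (data.map (fun (i : String × String × String × String) => i.1)))
      (fun (a : String) => some ((data.filter (fun (i : String × String × String × String) => i.1 == a)).foldl
        (fun (m : DB) i => gB2 i m)
        ((data.filter (fun (i : String × String × String × String) => i.1 == a)).foldl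
          (fun (m : DB) i => gB1 i m) PySem.Dict.empty)))
      (PySem.Set.nodup_ofList _) h2'
      (fun i hi => (PySem.Set.mem_ofList _ _).mpr (List.mem_map_of_mem hi))
  rw [h3]
  apply List.map_congr_left
  intro a _
  rw [foldl_someWrap (fun (i : String × String × String × String) (m : DB) => gB3 i m) PySem.Dict.empty]
  rfl

lemma tree_creator_eq_canon (data : List (String × String × String × String)) :
    tree_creator data = canonA data := by
  unfold tree_creator
  rw [treeA_items, List.map_map]
  unfold canonA
  apply List.map_congr_left
  intro a _
  simp only [Function.comp_apply, Option.getD_some]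
  rw [WB_items, List.map_map]
  unfold canonB
  apply congrArg (Prod.mk a)
  apply List.map_congr_left
  intro b _
  simp only [Function.comp_apply, Option.getD_some]
  rw [WC_items, List.map_map]
  unfold canonC
  apply congrArg (Prod.mk b)
  apply List.map_congr_left
  intro c _
  simp

lemma altC (js : List (String × String × String × String)) :
    (js.foldl (fun (t : PySem.Dict String (List String)) i =>
        t.modify i.2.2.1 [] (fun l3 => l3 ++ [i.2.2.2])) PySem.Dict.empty).items = canonC js := by
  have h : (js.foldl (fun (t : PySem.Dict String (List String)) i =>
        t.modify i.2.2.1 [] (fun l3 => l3 ++ [i.2.2.2])) PySem.Dict.empty).items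
      = (PySem.Set.ofList (js.map (fun i => i.2.2.1))).map
          (fun c => (c, (js.filter (fun i => i.2.2.1 == c)).foldl (fun (l : List String) i => l ++ [i.2.2.2]) [])) :=
    modifyFold_items_empty (fun (i : String × String × String × String) => i.2.2.1) []
      (fun (i : String × String × String × String) l => l ++ [i.2.2.2]) js
  rw [h]
  unfold canonC
  apply List.map_congr_left
  intro c _
  rw [PySem.List.foldl_append_singleton_eq_map (fun (i : String × String × String × String) => i.2.2.2)]
  simp

lemma altB (js : List (String × String × String × String)) :
    ((js.foldl (fun (t : PySem.Dict String (PySem.Dict String (List String))) i =>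
        t.modify i.2.1 PySem.Dict.empty (fun l2 =>
          l2.modify i.2.2.1 [] (fun l3 => l3 ++ [i.2.2.2]))) PySem.Dict.empty)).items.map
      (fun q => (q.1, q.2.items)) = canonB js := by
  have h : (js.foldl (fun (t : PySem.Dict String (PySem.Dict String (List String))) i =>
        t.modify i.2.1 PySem.Dict.empty (fun l2 =>
          l2.modify i.2.2.1 [] (fun l3 => l3 ++ [i.2.2.2]))) PySem.Dict.empty).items
      = (PySem.Set.ofList (js.map (fun i => i.2.1))).map
          (fun b => (b, (js.filter (fun i => i.2.1 == b)).foldl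
            (fun (l2 : PySem.Dict String (List String)) i =>
              l2.modify i.2.2.1 [] (fun l3 => l3 ++ [i.2.2.2])) PySem.Dict.empty)) :=
    modifyFold_items_empty (fun (i : String × String × String × String) => i.2.1) PySem.Dict.empty
      (fun (i : String × String × String × String) l2 =>
        l2.modify i.2.2.1 [] (fun l3 => l3 ++ [i.2.2.2])) js
  rw [h, List.map_map]
  unfold canonB
  apply List.map_congr_left
  intro b _
  simp only [Function.comp_apply]
  exact congrArg (Prod.mk b) (altC _)

lemma tree_creator_alt_eq_canon (data : List (String × String × String × String)) :
    tree_creator_alt data = canonA data := by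
  unfold tree_creator_alt
  have h : (data.foldl (fun (t : PySem.Dict String (PySem.Dict String (PySem.Dict String (List String)))) i =>
        t.modify i.1 PySem.Dict.empty (fun l1 =>
          l1.modify i.2.1 PySem.Dict.empty (fun l2 =>
            l2.modify i.2.2.1 [] (fun l3 => l3 ++ [i.2.2.2])))) PySem.Dict.empty).items
      = (PySem.Set.ofList (data.map (fun i => i.1))).map
          (fun a => (a, (data.filter (fun i => i.1 == a)).foldl
            (fun (l1 : PySem.Dict String (PySem.Dict String (List String))) i =>
              l1.modify i.2.1 PySem.Dict.empty (fun l2 =>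
                l2.modify i.2.2.1 [] (fun l3 => l3 ++ [i.2.2.2]))) PySem.Dict.empty)) :=
    modifyFold_items_empty (fun (i : String × String × String × String) => i.1) PySem.Dict.empty
      (fun (i : String × String × String × String) l1 =>
        l1.modify i.2.1 PySem.Dict.empty (fun l2 =>
          l2.modify i.2.2.1 [] (fun l3 => l3 ++ [i.2.2.2]))) data
  rw [h, List.map_map]
  unfold canonA
  apply List.map_congr_left
  intro a _
  simp only [Function.comp_apply]
  exact congrArg (Prod.mk a) (altB _)

-- ===== VERDICT (by name: the statement is the Claim_ definition above) =====
theorem tree_creator_spec : Claim_equal_tree_creator := by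
  intro data _
  unfold Spec_tree_creator
  rw [tree_creator_eq_canon, tree_creator_alt_eq_canon]
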